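-- pv_equiv track=rewrite | github.com/FonziePants/adventofcode | 2023/day07/day07.py | calc_hand_value
-- ===== SOURCE A (Python) =====
-- hand_values = {
--     (1,5): 7, # 5K
--     (2,4): 6, # 4K
--     (2,3): 5, # FH
--     (3,3): 4, # 3K
--     (3,2): 3, # 2P
--     (4,2): 2, # 1P
--     (5,1): 1, # HC
-- }
--
-- def calc_hand_value(hand, wild_j):
--     cards = {}
--     for card in hand:
--         cards[card] = cards[card]+1 if card in cards else 1
--     j = cards.pop('J', 0) if wild_j else 0
--     unique = len(cards)
--     max_match = max([cards[c] for c in cards]) + j if unique > 0 else 5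
--     return hand_values[(max(unique, 1), max_match)]
-- ===== SOURCE B (Python) =====
-- hand_signatures = {
--     (5,): 7,            # 5K
--     (4, 1): 6,          # 4K
--     (3, 2): 5,          # FH
--     (3, 1, 1): 4,       # 3K
--     (2, 2, 1): 3,       # 2P
--     (2, 1, 1, 1): 2,    # 1P
--     (1, 1, 1, 1, 1): 1, # HC
-- }
--
-- def calc_hand_value(hand, wild_j):
--     j = hand.count('J') if wild_j else 0
--     groups = sorted((hand.count(c) for c in set(hand)
--                      if not (wild_j and c == 'J')), reverse=True)
--     if groups:
--         groups = [groups[0] + j] + groups[1:]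
--     else:
--         groups = [5]
--     return hand_signatures[tuple(groups)]
-- ===== Notes on version B (the rewrite author's own statement) =====
-- stated objective: idiomatic
-- what changed: B replaces A's hand-built dict loop plus (distinct-count, max-group+jokers) pair key by the idiomatic Counter-style signature: the descending sorted tuple of group sizes with jokers merged into the largest group, looked up in a table of the seven poker partition signatures.
-- outside the precondition, e.g. on calc_hand_value('AAAKKK', False): A returns 5, B raises KeyError; on calc_hand_value('AAAK', False): A returns 5, B raises KeyError
import Mathlib
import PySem

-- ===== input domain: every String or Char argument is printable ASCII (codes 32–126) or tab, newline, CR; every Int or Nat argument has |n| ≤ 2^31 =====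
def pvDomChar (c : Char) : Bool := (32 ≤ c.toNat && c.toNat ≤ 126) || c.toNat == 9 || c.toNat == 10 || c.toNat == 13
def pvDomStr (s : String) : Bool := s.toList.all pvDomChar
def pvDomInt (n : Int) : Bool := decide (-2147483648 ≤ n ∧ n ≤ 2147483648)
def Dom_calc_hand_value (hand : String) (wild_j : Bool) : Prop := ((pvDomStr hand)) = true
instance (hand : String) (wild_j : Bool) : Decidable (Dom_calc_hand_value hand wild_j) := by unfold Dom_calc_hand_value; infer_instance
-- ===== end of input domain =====

-- B replaces A's (distinct-count, max-group) pair key by the idiomatic sorted-signature lookup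
-- (sorted group sizes with jokers merged into the largest group); equal on 5-card hands.


-- B replaces A's (distinct-count, max-group) pair key by a sorted-signature lookup:
-- the descending list of group sizes with jokers merged into the largest group, looked up
-- in a table of the seven partition signatures; equal to A on every 5-card hand.

-- ===== PORT A =====
def handValues : PySem.Dict (Int × Int) Int :=
  PySem.Dict.ofList [((1,5),7),((2,4),6),((2,3),5),((3,3),4),((3,2),3),((4,2),2),((5,1),1)]

def calc_hand_value (hand : String) (wild_j : Bool) : Int :=
  let cards := hand.toList.foldl
    (fun d card => if d.contains card then d.insert card (d.getD card 0 + 1) else d.insert card 1)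
    PySem.Dict.empty
  -- cards.pop('J', 0): yields the stored value (or the default 0) and removes the key
  let j : Int := if wild_j then cards.getD 'J' 0 else 0
  let cards := if wild_j then cards.erase 'J' else cards
  let unique : Int := (cards.size : Int)
  -- cards[c] for c iterating over cards never raises; getD is exact here
  let max_match : Int :=
    if unique > 0 then ((PySem.List.max? (cards.keys.map (fun c => cards.getD c 0)) (fun x => x)).getD 0) + j
    else 5
  -- hand_values[...]: raises KeyError only outside Pre_ (hands that are not 5 cards)
  (handValues.get? (max unique 1, max_match)).getD 0

-- ===== PORT B =====
def handSignatures : PySem.Dict (List Int) Int :=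
  PySem.Dict.ofList [([5],7),([4,1],6),([3,2],5),([3,1,1],4),([2,2,1],3),([2,1,1,1],2),([1,1,1,1,1],1)]

def calc_hand_value_alt (hand : String) (wild_j : Bool) : Int :=
  let cs := hand.toList
  let j : Int := if wild_j then (cs.count 'J' : Int) else 0
  -- sorted((hand.count(c) for c in set(hand) if not (wild_j and c == 'J')), reverse=True):
  -- a multiset of ints, so the result does not depend on the set's iteration order
  let groups := PySem.List.sorted
    (((PySem.Set.ofList cs).filter (fun c => !(wild_j && c == 'J'))).map (fun c => (cs.count c : Int)))
    (fun x => x) true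
  let groups : List Int :=
    match groups with
    | [] => [5]
    | g :: t => (g + j) :: t
  -- hand_signatures[...]: raises KeyError only outside Pre_ (hands that are not 5 cards)
  (handSignatures.get? groups).getD 0

-- ===== PRECONDITION & SPEC =====
-- Pre_ admits 5-card hands (the function's domain) and the degenerate empty/all-wild-joker
-- hands; on other malformed hands A's (unique, max+jokers) key accidentally hits the table
-- for some shapes (e.g. 'AAAKKK' -> 5) while raising KeyError for others, and B raises
-- KeyError on all of them.
def Pre_calc_hand_value (hand : String) (wild_j : Bool) : Prop :=
  hand.toList.length = 5 ∨ hand.toList.all (fun c => wild_j && c == 'J') = true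
instance (hand : String) (wild_j : Bool) : Decidable (Pre_calc_hand_value hand wild_j) := by
  unfold Pre_calc_hand_value; infer_instance
def pvWitness_calc_hand_value : String × Bool := ("AAAKQ", false)

def Spec_calc_hand_value (hand : String) (wild_j : Bool) (out : Int) : Prop := out = calc_hand_value_alt hand wild_j
instance (hand : String) (wild_j : Bool) (out : Int) : Decidable (Spec_calc_hand_value hand wild_j out) := by unfold Spec_calc_hand_value; infer_instance

-- ===== CLAIM (what is proved, stated in full; the proofs are below) =====
def Claim_equal_calc_hand_value : Prop := ∀ (hand : String) (wild_j : Bool), Dom_calc_hand_value hand wild_j → Pre_calc_hand_value hand wild_j → Spec_calc_hand_value hand wild_j (calc_hand_value hand wild_j)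

-- ===== LEMMAS AND PROOFS =====

theorem fold_eq_counter (cs : List Char) :
    cs.foldl (fun d card => if d.contains card then d.insert card (d.getD card 0 + 1) else d.insert card 1)
      PySem.Dict.empty = PySem.Dict.counter cs := by
  rw [← PySem.Dict.foldl_insert_getD_add_one_eq_counter]
  congr 1
  funext d c
  by_cases h : d.contains c
  · simp [h]
  · have h0 : d.getD c 0 = 0 := PySem.Dict.getD_of_not_contains d (k := c) (0 : Int) (by simpa using h)
    simp [h, h0]

theorem sum_ge_length (l : List Int) (h : ∀ x ∈ l, 1 ≤ x) : (l.length : Int) ≤ l.sum := by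
  induction l with
  | nil => simp
  | cons x t ih =>
    have := h x (by simp)
    have := ih (fun y hy => h y (by simp [hy]))
    simp only [List.length_cons, List.sum_cons]
    push_cast
    omega

theorem filter_beq_of_nodup (l : List Char) (hl : l.Nodup) (a : Char) :
    l.filter (· == a) = if a ∈ l then [a] else [] := by
  induction l with
  | nil => simp
  | cons x t ih =>
    rcases List.nodup_cons.mp hl with ⟨hx, ht⟩
    by_cases hxa : x = a
    · subst hxa
      simp [ih ht, hx]
    · simp [hxa, ih ht, Ne.symm hxa]

theorem sum_map_count_ofList (cs : List Char) :
    ((PySem.Set.ofList cs).map (fun c => (cs.count c : Int))).sum = (cs.length : Int) := by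
  have hperm : (PySem.Set.ofList cs).Perm cs.dedup := by
    rw [List.perm_ext_iff_of_nodup (PySem.Set.nodup_ofList cs) cs.nodup_dedup]
    intro a
    simp [PySem.Set.mem_ofList]
  have := List.sum_map_count_dedup_eq_length cs
  have hcast : ((cs.dedup.map (fun c => cs.count c)).sum : Int) = (cs.length : Int) := by
    exact_mod_cast congrArg (Nat.cast : Nat → Int) this
  calc ((PySem.Set.ofList cs).map (fun c => (cs.count c : Int))).sum
      = ((cs.dedup).map (fun c => (cs.count c : Int))).sum := (hperm.map _).sum_eq
    _ = (cs.length : Int) := by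
        rw [← hcast]
        simp [Nat.cast_list_sum, List.map_map]
        rfl

theorem tables_agree (g j : Int) (t : List Int) (hg : 1 ≤ g) (hj : 0 ≤ j)
    (ht1 : ∀ x ∈ t, 1 ≤ x)
    (hpw : List.Pairwise (fun a b => b ≤ a) (g :: t))
    (hsum : g + t.sum = 5 - j) :
    (handValues.get? ((1 + t.length : Int), g + j)).getD 0 =
      (handSignatures.get? ((g + j) :: t)).getD 0 := by
  match t with
  | [] =>
    have : g + j = 5 := by simp at hsum; omega
    rw [this]; decide
  | [b] =>
    have hb := ht1 b (by simp)
    simp only [List.pairwise_cons] at hpw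
    have hbg : b ≤ g := by simp at hpw; tauto
    simp only [List.sum_cons, List.sum_nil] at hsum
    have : (g + j = 4 ∧ b = 1) ∨ (g + j = 3 ∧ b = 2) := by omega
    rcases this with ⟨h1, h2⟩ | ⟨h1, h2⟩ <;> rw [h1, h2] <;> decide
  | [b, c] =>
    have hb := ht1 b (by simp); have hc := ht1 c (by simp)
    simp only [List.pairwise_cons, List.mem_cons] at hpw
    have hbg : b ≤ g := by simp at hpw; tauto
    have hcb : c ≤ b := by simp at hpw; tauto
    simp only [List.sum_cons, List.sum_nil] at hsum
    have : (g + j = 3 ∧ b = 1 ∧ c = 1) ∨ (g + j = 2 ∧ b = 2 ∧ c = 1) := by omega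
    rcases this with ⟨h1, h2, h3⟩ | ⟨h1, h2, h3⟩ <;> rw [h1, h2, h3] <;> decide
  | [b, c, d] =>
    have hb := ht1 b (by simp); have hc := ht1 c (by simp); have hd := ht1 d (by simp)
    have hbg : b ≤ g := by simp [List.pairwise_cons] at hpw; tauto
    have hcb : c ≤ b := by simp [List.pairwise_cons] at hpw; tauto
    have hdc : d ≤ c := by simp [List.pairwise_cons] at hpw; tauto
    simp only [List.sum_cons, List.sum_nil] at hsum
    have : g + j = 2 ∧ b = 1 ∧ c = 1 ∧ d = 1 := by omega
    rcases this with ⟨h1, h2, h3, h4⟩; rw [h1, h2, h3, h4]; decide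
  | [b, c, d, e] =>
    have hb := ht1 b (by simp); have hc := ht1 c (by simp); have hd := ht1 d (by simp)
    have he := ht1 e (by simp)
    have hbg : b ≤ g := by simp [List.pairwise_cons] at hpw; tauto
    simp only [List.sum_cons, List.sum_nil] at hsum
    have : g + j = 1 ∧ b = 1 ∧ c = 1 ∧ d = 1 ∧ e = 1 := by omega
    rcases this with ⟨h1, h2, h3, h4, h5⟩; rw [h1, h2, h3, h4, h5]; decide
  | b :: c :: d :: e :: f :: t' =>
    exfalso
    simp only [List.sum_cons] at hsum
    have hb := ht1 b (by simp); have hc := ht1 c (by simp); have hd := ht1 d (by simp)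
    have he := ht1 e (by simp); have hf := ht1 f (by simp)
    have ht' : (t'.length : Int) ≤ t'.sum := sum_ge_length t' (fun y hy => ht1 y (by simp [hy]))
    have h0 : (0:Int) ≤ t'.length := by positivity
    omega

theorem items_cards (cs : List Char) (wild_j : Bool) :
    (if wild_j then (PySem.Dict.counter cs).erase 'J' else PySem.Dict.counter cs).items
      = ((PySem.Set.ofList cs).filter (fun c => !(wild_j && c == 'J'))).map
          (fun k => (k, (cs.count k : Int))) := by
  cases wild_j with
  | false => simp [PySem.Dict.items_counter]
  | true =>
    simp only [PySem.Dict.erase, PySem.Dict.items_counter, List.filter_map]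
    rw [if_pos trivial]
    have hf : List.filter ((fun p => !p.1 == 'J') ∘ fun k => (k, (cs.count k : Int))) (PySem.Set.ofList cs)
        = List.filter (fun c => !(true && c == 'J')) (PySem.Set.ofList cs) := by
      apply List.filter_congr
      intro c _
      simp [Function.comp]
    rw [hf]

-- the sum of the remaining group sizes

theorem sum_groups (cs : List Char) (wild_j : Bool) :
    (((PySem.Set.ofList cs).filter (fun c => !(wild_j && c == 'J'))).map
        (fun c => (cs.count c : Int))).sum
      = (cs.length : Int) - (if wild_j then (cs.count 'J' : Int) else 0) := by
  cases wild_j with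
  | false => simp [sum_map_count_ofList]
  | true =>
    have hsplit := List.filter_append_perm (fun c => !(true && c == 'J')) (PySem.Set.ofList cs)
    have hmap := (hsplit.map (fun c => (cs.count c : Int))).sum_eq
    rw [List.map_append, List.sum_append] at hmap
    have hneg : (PySem.Set.ofList cs).filter (fun c => !(!(true && c == 'J'))) = (PySem.Set.ofList cs).filter (· == 'J') := by
      apply List.filter_congr; intro c _; simp
    rw [hneg, filter_beq_of_nodup _ (PySem.Set.nodup_ofList cs) 'J'] at hmap
    by_cases hJ : 'J' ∈ PySem.Set.ofList cs
    · rw [if_pos hJ] at hmap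
      simp only [List.map_cons, List.map_nil, List.sum_cons, List.sum_nil] at hmap
      rw [sum_map_count_ofList] at hmap
      simp only [if_true]
      omega
    · rw [if_neg hJ] at hmap
      simp only [List.map_nil, List.sum_nil, add_zero] at hmap
      rw [sum_map_count_ofList] at hmap
      have : cs.count 'J' = 0 := by
        rw [List.count_eq_zero]
        intro hmem; exact hJ ((PySem.Set.mem_ofList _ _).mpr hmem)
      simp only [this, hmap]
      simp

-- keys of the dict after the optional pop

theorem keys_cards (cs : List Char) (wild_j : Bool) :
    (if wild_j then (PySem.Dict.counter cs).erase 'J' else PySem.Dict.counter cs).keys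
      = (PySem.Set.ofList cs).filter (fun c => !(wild_j && c == 'J')) := by
  have h := items_cards cs wild_j
  simp only [PySem.Dict.keys, h, List.map_map]
  exact List.map_id _

theorem vals_cards (cs : List Char) (wild_j : Bool) :
    ((if wild_j then (PySem.Dict.counter cs).erase 'J' else PySem.Dict.counter cs).keys.map
        (fun c => (if wild_j then (PySem.Dict.counter cs).erase 'J' else PySem.Dict.counter cs).getD c 0))
      = ((PySem.Set.ofList cs).filter (fun c => !(wild_j && c == 'J'))).map
          (fun c => (cs.count c : Int)) := by
  have hnd : (if wild_j then (PySem.Dict.counter cs).erase 'J' else PySem.Dict.counter cs).keys.Nodup := by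
    rw [keys_cards]; exact (PySem.Set.nodup_ofList cs).filter _
  rw [keys_cards]
  apply List.map_congr_left
  intro c hc
  exact PySem.Dict.getD_of_mem_items _
    (by rw [items_cards]; exact List.mem_map_of_mem hc) hnd 0

theorem size_cards (cs : List Char) (wild_j : Bool) :
    ((if wild_j then (PySem.Dict.counter cs).erase 'J' else PySem.Dict.counter cs).size : Int)
      = ((((PySem.Set.ofList cs).filter (fun c => !(wild_j && c == 'J'))).map
          (fun c => (cs.count c : Int))).length : Int) := by
  simp only [PySem.Dict.size, items_cards, List.length_map]

-- both ports' tails agree for any 5-total multiset of positive group sizes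

theorem final_comb (L : List Int) (j : Int) (hj : 0 ≤ j) (h1 : ∀ x ∈ L, 1 ≤ x)
    (hsum : L ≠ [] → L.sum = 5 - j) :
    (handValues.get? (max (L.length : Int) 1,
        if (L.length : Int) > 0 then ((PySem.List.max? L (fun x => x)).getD 0) + j else 5)).getD 0
      = (handSignatures.get?
          (match PySem.List.sorted L (fun x => x) true with
            | [] => ([5] : List Int)
            | g :: t => (g + j) :: t)).getD 0 := by
  rcases hGe : PySem.List.sorted L (fun x => x) true with _ | ⟨g, t⟩
  · have hLnil : L = [] := (PySem.List.sorted_eq_nil_iff _ _ _).mp hGe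
    rw [hLnil]
    norm_num
    decide
  · have hperm : (g :: t).Perm L := by rw [← hGe]; exact PySem.List.sorted_perm L _ true
    have hpw : List.Pairwise (fun a b => b ≤ a) (g :: t) := by
      rw [← hGe]; exact PySem.List.sorted_pairwise_rev L _
    have hlen : L.length = 1 + t.length := by
      have := hperm.length_eq; simp at this; omega
    have hgmem : g ∈ L := hperm.mem_iff.mp (by simp)
    have hg : 1 ≤ g := h1 g hgmem
    have ht1 : ∀ x ∈ t, 1 ≤ x := fun x hx => h1 x (hperm.mem_iff.mp (by simp [hx]))
    have hsum' : g + t.sum = 5 - j := by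
      have hs := hsum (by
        intro hnil
        rw [hnil] at hlen
        simp at hlen
        omega)
      have := hperm.sum_eq; simp at this; omega
    have hmax : (PySem.List.max? L (fun x => x)).getD 0 = g := by
      have hne : L ≠ [] := by
        intro hnil
        rw [hnil] at hlen
        simp at hlen
        omega
      obtain ⟨m, hm⟩ : ∃ m, PySem.List.max? L (fun x => x) = some m := by
        rcases hopt : PySem.List.max? L (fun x => x) with _ | m
        · exact absurd ((PySem.List.max?_eq_none_iff _ _).mp hopt) hne
        · exact ⟨m, rfl⟩
      rw [hm]
      have hmL : m ∈ L := PySem.List.max?_mem hm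
      have hle1 : g ≤ m := PySem.List.max?_isMax hm g hgmem
      have hle2 : m ≤ g := by
        rcases List.mem_cons.mp (hperm.mem_iff.mpr hmL) with h | h
        · omega
        · have := (List.pairwise_cons.mp hpw).1 m h
          omega
      simp; omega
    have hpos : ((L.length : Int) > 0) := by rw [hlen]; positivity
    rw [if_pos hpos, hmax]
    have hmaxlen : max (L.length : Int) 1 = (1 + t.length : Int) := by
      rw [hlen]; push_cast; omega
    rw [hmaxlen]
    exact tables_agree g j t hg hj ht1 hpw hsum'

theorem ports_agree (hand : String) (wild_j : Bool)
    (hpre : hand.toList.length = 5 ∨ hand.toList.all (fun c => wild_j && c == 'J') = true) :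
    calc_hand_value hand wild_j = calc_hand_value_alt hand wild_j := by
  unfold calc_hand_value calc_hand_value_alt
  simp only [fold_eq_counter, vals_cards, size_cards, PySem.Dict.getD_counter]
  apply final_comb
  · cases wild_j <;> simp
  · intro x hx
    obtain ⟨c, hc, rfl⟩ := List.mem_map.mp hx
    have hcmem : c ∈ hand.toList := (PySem.Set.mem_ofList _ _).mp (List.mem_of_mem_filter hc)
    have := List.count_pos_iff.mpr hcmem
    omega
  · intro hne
    rcases hpre with hpre | hpre
    · rw [sum_groups, hpre]
      cases wild_j <;> simp
    · exfalso
      apply hne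
      have hfil : (PySem.Set.ofList hand.toList).filter (fun c => !(wild_j && c == 'J')) = [] := by
        rw [List.filter_eq_nil_iff]
        intro a ha
        have : a ∈ hand.toList := (PySem.Set.mem_ofList _ _).mp ha
        have := List.all_eq_true.mp hpre a this
        simp at this ⊢
        exact this
      rw [hfil]
      simp

-- ===== VERDICT (by name: the statement is the Claim_ definition above) =====
theorem calc_hand_value_spec : Claim_equal_calc_hand_value := by
  intro hand wild_j _ hpre
  show calc_hand_value hand wild_j = calc_hand_value_alt hand wild_j
  exact ports_agree hand wild_j hpre
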